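-- pv_equiv track=rewrite | github.com/Kawser-nerd/CLCDSA | Source Codes/AtCoder/arc087/B/3876209.py | DP
-- ===== SOURCE A (Python) =====
-- def DP(i, z, ini, Move = list):
--     canMove = set([ini])
--     for j in range(i):
--         temp = []
--         for item in canMove:
--             temp.append(item+Move[j])
--             temp.append(item-Move[j])
--         canMove = set(temp)
--     return z in canMove
-- ===== SOURCE B (Python) =====
-- def DP(i, z, ini, Move = list):
--     # Meet in the middle: expand each half of the moves separately and join on the target.
--     ms = [Move[j] for j in range(i)]
--     h = len(ms) // 2
--     left = {0}
--     for m in ms[:h]: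
--         left = {s + m for s in left} | {s - m for s in left}
--     right = {0}
--     for m in ms[h:]:
--         right = {s + m for s in right} | {s - m for s in right}
--     target = z - ini
--     return any(target - s in right for s in left)
-- ===== Notes on version B (the rewrite author's own statement) =====
-- stated objective: alternative
-- what changed: Replaces A's single breadth-first expansion of the full reachable-position set by meet-in-the-middle: each half of the moves is expanded separately into a signed-sum set and the two halves are joined by membership lookups on the target.
import Mathlib
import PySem

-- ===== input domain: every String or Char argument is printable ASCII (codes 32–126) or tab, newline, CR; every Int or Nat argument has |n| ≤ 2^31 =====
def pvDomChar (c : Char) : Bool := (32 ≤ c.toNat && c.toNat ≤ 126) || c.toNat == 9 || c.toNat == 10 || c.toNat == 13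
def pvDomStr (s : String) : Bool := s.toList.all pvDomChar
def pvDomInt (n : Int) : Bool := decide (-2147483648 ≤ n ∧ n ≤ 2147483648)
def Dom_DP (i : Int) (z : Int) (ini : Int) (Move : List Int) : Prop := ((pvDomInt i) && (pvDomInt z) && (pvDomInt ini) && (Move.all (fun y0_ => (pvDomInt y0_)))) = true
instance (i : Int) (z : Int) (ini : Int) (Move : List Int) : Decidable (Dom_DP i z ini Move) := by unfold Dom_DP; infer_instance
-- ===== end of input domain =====

-- B replaces A's single breadth-first expansion of the reachable set by meet-in-the-middle over the two halves of the moves.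

-- ===== PORT A =====
def DP (i : Int) (z : Int) (ini : Int) (Move : List Int) : Bool :=
  let canMove : PySem.Set Int :=
    (PySem.List.pyRange 0 i 1).foldl
      (fun canMove j =>
        let temp : List Int :=
          canMove.foldl
            (fun temp item =>
              (temp ++ [item + PySem.List.pyGetD Move j 0]) ++ [item - PySem.List.pyGetD Move j 0])
            []
        PySem.Set.ofList temp)
      (PySem.Set.ofList [ini])
  PySem.Set.contains canMove z

-- ===== PORT B =====
def DP_alt (i : Int) (z : Int) (ini : Int) (Move : List Int) : Bool :=
  let ms : List Int := (PySem.List.pyRange 0 i 1).map (fun j => PySem.List.pyGetD Move j 0)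
  let h : Int := PySem.Int.floordiv (ms.length : Int) 2
  let left : PySem.Set Int :=
    (PySem.List.slice ms none (some h)).foldl
      (fun left m =>
        PySem.Set.union (PySem.Set.ofList (left.map (fun s => s + m)))
                        (PySem.Set.ofList (left.map (fun s => s - m))))
      (PySem.Set.ofList [0])
  let right : PySem.Set Int :=
    (PySem.List.slice ms (some h) none).foldl
      (fun right m =>
        PySem.Set.union (PySem.Set.ofList (right.map (fun s => s + m)))
                        (PySem.Set.ofList (right.map (fun s => s - m))))
      (PySem.Set.ofList [0])
  let target : Int := z - ini
  left.any (fun s => PySem.Set.contains right (target - s))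

-- ===== PRECONDITION & SPEC =====
-- Pre_ excludes exactly the inputs where Python A raises IndexError: 0 < i and i > len(Move)
-- (the loop reads Move[j] for j < i).
def Pre_DP (i : Int) (z : Int) (ini : Int) (Move : List Int) : Prop :=
  i ≤ (Move.length : Int) ∨ i ≤ 0
instance (i : Int) (z : Int) (ini : Int) (Move : List Int) : Decidable (Pre_DP i z ini Move) := by unfold Pre_DP; infer_instance

def pvWitness_DP : Int × Int × Int × List Int := (2, 3, 0, [1, 2])

def Spec_DP (i : Int) (z : Int) (ini : Int) (Move : List Int) (out : Bool) : Prop := out = DP_alt i z ini Move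
instance (i : Int) (z : Int) (ini : Int) (Move : List Int) (out : Bool) : Decidable (Spec_DP i z ini Move out) := by unfold Spec_DP; infer_instance

-- ===== CLAIM (what is proved, stated in full; the proofs are below) =====
def Claim_equal_DP : Prop := ∀ (i : Int) (z : Int) (ini : Int) (Move : List Int), Dom_DP i z ini Move → Pre_DP i z ini Move → Spec_DP i z ini Move (DP i z ini Move)

-- ===== LEMMAS AND PROOFS =====

-- One round of A: the set of all item ± m.
def stepA (s : PySem.Set Int) (m : Int) : PySem.Set Int :=
  PySem.Set.ofList (s.foldl (fun temp item => (temp ++ [item + m]) ++ [item - m]) [])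

-- One round of B: the set of all s ± m, built as a union of two mapped sets.
def stepC (s : PySem.Set Int) (m : Int) : PySem.Set Int :=
  PySem.Set.union (PySem.Set.ofList (s.map (fun v => v + m)))
                  (PySem.Set.ofList (s.map (fun v => v - m)))

lemma mem_stepA (s : PySem.Set Int) (m : Int) (x : Int) :
    x ∈ stepA s m ↔ ∃ y ∈ s, x = y + m ∨ x = y - m := by
  unfold stepA
  rw [PySem.Set.mem_ofList]
  have h : s.foldl (fun temp item => (temp ++ [item + m]) ++ [item - m]) []
      = ([] : List Int) ++ s.flatMap (fun item => [item + m, item - m]) := by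
    have := PySem.List.foldl_append_eq_flatMap (fun item : Int => [item + m, item - m]) s ([] : List Int)
    simpa [List.append_assoc] using this
  rw [h]
  simp [List.mem_flatMap]

lemma mem_stepC (s : PySem.Set Int) (m : Int) (x : Int) :
    x ∈ stepC s m ↔ ∃ y ∈ s, x = y + m ∨ x = y - m := by
  unfold stepC
  rw [PySem.Set.mem_union, PySem.Set.mem_ofList, PySem.Set.mem_ofList]
  simp only [List.mem_map]
  constructor
  · rintro (⟨y, hy, rfl⟩ | ⟨y, hy, rfl⟩)
    · exact ⟨y, hy, Or.inl rfl⟩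
    · exact ⟨y, hy, Or.inr rfl⟩
  · rintro ⟨y, hy, rfl | rfl⟩
    · exact Or.inl ⟨y, hy, rfl⟩
    · exact Or.inr ⟨y, hy, rfl⟩

-- The two step functions preserve membership-equivalence of the accumulated sets.
lemma transfer_fold (ms : List Int) :
    ∀ (s t : PySem.Set Int), (∀ x : Int, x ∈ s ↔ x ∈ t) →
      ∀ x : Int, x ∈ ms.foldl stepA s ↔ x ∈ ms.foldl stepC t := by
  induction ms with
  | nil => intro s t hst x; simpa [List.foldl_nil] using hst x
  | cons m ms ih =>
    intro s t hst x
    simp only [List.foldl_cons]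
    apply ih
    intro y
    rw [mem_stepA, mem_stepC]
    constructor
    · rintro ⟨w, hw, hy⟩; exact ⟨w, (hst w).1 hw, hy⟩
    · rintro ⟨w, hw, hy⟩; exact ⟨w, (hst w).2 hw, hy⟩

-- Translation invariance: the fold from any start set is the fold from {0} shifted by a start element.
lemma shift_fold (ms : List Int) :
    ∀ (s : PySem.Set Int) (x : Int),
      x ∈ ms.foldl stepA s ↔ ∃ y ∈ s, x - y ∈ ms.foldl stepA (PySem.Set.ofList [0]) := by
  induction ms with
  | nil =>
    intro s x
    simp only [List.foldl_nil, PySem.Set.mem_ofList, List.mem_singleton]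
    constructor
    · intro hx; exact ⟨x, hx, by omega⟩
    · rintro ⟨y, hy, h0⟩
      have : x = y := by omega
      rwa [this]
  | cons m ms ih =>
    intro s x
    simp only [List.foldl_cons]
    rw [ih (stepA s m)]
    constructor
    · rintro ⟨y, hy, hrest⟩
      obtain ⟨w, hw, hyw⟩ := (mem_stepA s m y).1 hy
      refine ⟨w, hw, (ih (stepA (PySem.Set.ofList [0]) m) (x - w)).2 ⟨y - w, ?_, ?_⟩⟩
      · rw [mem_stepA]
        exact ⟨0, by simp [PySem.Set.mem_ofList], by omega⟩
      · have h' : x - w - (y - w) = x - y := by ring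
        rwa [h']
    · rintro ⟨w, hw, hmem⟩
      obtain ⟨u, hu, hru⟩ := (ih (stepA (PySem.Set.ofList [0]) m) (x - w)).1 hmem
      obtain ⟨v, hv, huv⟩ := (mem_stepA _ m u).1 hu
      have hv0 : v = 0 := by simpa [PySem.Set.mem_ofList] using hv
      refine ⟨w + u, ?_, ?_⟩
      · rw [mem_stepA]
        exact ⟨w, hw, by omega⟩
      · have h' : x - (w + u) = x - w - u := by ring
        rwa [h']

-- ===== VERDICT (by name: the statement is the Claim_ definition above) =====
theorem DP_spec : Claim_equal_DP := by
  intro i z ini Move _ _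
  unfold Spec_DP DP DP_alt
  dsimp only
  set ms : List Int := (PySem.List.pyRange 0 i 1).map (fun j => PySem.List.pyGetD Move j 0) with hms
  have hA : (PySem.List.pyRange 0 i 1).foldl
      (fun canMove j => PySem.Set.ofList (canMove.foldl (fun temp item =>
        (temp ++ [item + PySem.List.pyGetD Move j 0]) ++ [item - PySem.List.pyGetD Move j 0]) []))
      (PySem.Set.ofList [ini])
      = ms.foldl stepA (PySem.Set.ofList [ini]) := by
    rw [hms, List.foldl_map]
    rfl
  have hh : PySem.Int.floordiv (ms.length : Int) 2 = ((ms.length / 2 : Nat) : Int) := by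
    exact_mod_cast PySem.Int.floordiv_natCast ms.length 2
  set k : Nat := ms.length / 2 with hk
  have hsl1 : PySem.List.slice ms none (some (PySem.Int.floordiv (ms.length : Int) 2)) = ms.take k := by
    rw [hh]; exact PySem.List.slice_to_natCast ms k
  have hsl2 : PySem.List.slice ms (some (PySem.Int.floordiv (ms.length : Int) 2)) none = ms.drop k := by
    rw [hh]; exact PySem.List.slice_from_natCast ms k
  rw [hA, hsl1, hsl2]
  rw [show (fun (left : PySem.Set Int) (m : Int) =>
        PySem.Set.union (PySem.Set.ofList (left.map (fun s => s + m)))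
                        (PySem.Set.ofList (left.map (fun s => s - m)))) = stepC from rfl]
  rw [Bool.eq_iff_iff]
  simp only [List.any_eq_true]
  have hcz : (List.foldl stepA (PySem.Set.ofList [ini]) ms).contains z = true
      ↔ z ∈ ms.foldl stepA (PySem.Set.ofList [ini]) := by
    simp [PySem.Set.contains]
  rw [hcz]
  calc z ∈ ms.foldl stepA (PySem.Set.ofList [ini])
      ↔ z ∈ (ms.drop k).foldl stepA ((ms.take k).foldl stepA (PySem.Set.ofList [ini])) := by
        rw [← List.foldl_append, List.take_append_drop]
    _ ↔ ∃ y ∈ (ms.take k).foldl stepA (PySem.Set.ofList [ini]),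
          z - y ∈ (ms.drop k).foldl stepA (PySem.Set.ofList [0]) := shift_fold _ _ _
    _ ↔ ∃ l ∈ (ms.take k).foldl stepA (PySem.Set.ofList [0]),
          z - ini - l ∈ (ms.drop k).foldl stepA (PySem.Set.ofList [0]) := by
        constructor
        · rintro ⟨y, hy, hz⟩
          obtain ⟨w, hw, hyw⟩ := (shift_fold (ms.take k) _ y).1 hy
          have hw' : w = ini := by simpa [PySem.Set.mem_ofList] using hw
          rw [hw'] at hyw
          refine ⟨y - ini, hyw, ?_⟩
          have h' : z - ini - (y - ini) = z - y := by ring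
          rwa [h']
        · rintro ⟨l, hl, hz⟩
          refine ⟨ini + l, ?_, ?_⟩
          · rw [shift_fold]
            exact ⟨ini, by simp [PySem.Set.mem_ofList], by simpa using hl⟩
          · have h' : z - (ini + l) = z - ini - l := by ring
            rwa [h']
    _ ↔ ∃ l ∈ (ms.take k).foldl stepC (PySem.Set.ofList [0]),
          z - ini - l ∈ (ms.drop k).foldl stepC (PySem.Set.ofList [0]) := by
        constructor
        · rintro ⟨l, hl, hz⟩
          exact ⟨l, (transfer_fold _ _ _ (fun _ => Iff.rfl) l).1 hl,
                 (transfer_fold _ _ _ (fun _ => Iff.rfl) _).1 hz⟩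
        · rintro ⟨l, hl, hz⟩
          exact ⟨l, (transfer_fold _ _ _ (fun _ => Iff.rfl) l).2 hl,
                 (transfer_fold _ _ _ (fun _ => Iff.rfl) _).2 hz⟩
    _ ↔ ∃ x ∈ (ms.take k).foldl stepC (PySem.Set.ofList [0]),
          ((ms.drop k).foldl stepC (PySem.Set.ofList [0])).contains (z - ini - x) = true := by
        simp [PySem.Set.contains]
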